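-- pv_equiv track=rewrite | github.com/smohapatra1/scripting | python/practice/start_again/2024/06282024/recording_episodes.py | build_digraph
-- ===== SOURCE A (Python) =====
-- def has_intersection(I1,I2):
--     if I1[0] >= I2[0] and I1[0] <= I2[1]: return True
--     if I1[1] >= I2[0] and I1[1] <= I2[1]: return True
--     if I2[0] >= I1[0] and I2[0] <= I1[1]: return True
--     if I2[1] >= I1[0] and I2[1] <= I1[1]: return True
--     return False
--
-- def build_digraph(S):
--     size = len(S)*4
--     G = []
--     GT = []
--     for c1 in range(size):
--         G.append([])
--         GT.append([])
--
--     for c1 in range(len(S)):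
--         i = c1*4
--         G[i+1].append(i+2)
--         GT[i+2].append(i+1)
--         G[i+3].append(i)
--         GT[i].append(i+3)
--
--     for c1 in range(len(S)):
--         for c2 in range(2):
--             i = c2*2
--             tr1 = [S[c1][i],S[c1][i+1]]
--             for c3 in range(c1, len(S)):
--                 for c4 in range(2):
--                     if c1==c3 and c2==c4: continue
--                     j = c4*2
--                     tr2 = [S[c3][j],S[c3][j+1]]
--                     if has_intersection(tr1,tr2):
--                         k = c1*4
--                         l = c3*4
--                         G[k+i].append(l+j+1)
--                         GT[l+j+1].append(k+i)
--                         if c1!=c3: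
--                             G[l+j].append(k+i+1)
--                             GT[k+i+1].append(l+j)
--
--     return [G,GT]
-- ===== SOURCE B (Python) =====
-- def has_intersection(I1,I2):
--     if I1[0] >= I2[0] and I1[0] <= I2[1]: return True
--     if I1[1] >= I2[0] and I1[1] <= I2[1]: return True
--     if I2[0] >= I1[0] and I2[0] <= I1[1]: return True
--     if I2[1] >= I1[0] and I2[1] <= I1[1]: return True
--     return False
--
-- def build_digraph(S):
--     # Two-phase: collect every implication edge once into a flat edge list E,
--     # then build G and GT by gathering from E (no interleaved adjacency mutation).
--     size = len(S)*4
--     E = []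
--     for c1 in range(len(S)):
--         i = c1*4
--         E.append((i+1, i+2))
--         E.append((i+3, i))
--     for c1 in range(len(S)):
--         for c2 in range(2):
--             i = c2*2
--             tr1 = [S[c1][i], S[c1][i+1]]
--             for c3 in range(c1, len(S)):
--                 for c4 in range(2):
--                     if c1==c3 and c2==c4: continue
--                     j = c4*2
--                     tr2 = [S[c3][j], S[c3][j+1]]
--                     if has_intersection(tr1, tr2):
--                         k = c1*4
--                         l = c3*4
--                         E.append((k+i, l+j+1))
--                         if c1 != c3:
--                             E.append((l+j, k+i+1))
--     G = [[v for (u, v) in E if u == n] for n in range(size)]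
--     GT = [[u for (u, v) in E if v == n] for n in range(size)]
--     return [G, GT]
-- ===== Notes on version B (the rewrite author's own statement) =====
-- stated objective: alternative
-- what changed: Instead of interleaved in-place appends into G and GT adjacency lists, B collects all implication edges once into a flat edge list and then builds G and GT by per-node gather comprehensions (trading an extra O(size*|E|) grouping pass for a mutation-free two-phase decomposition).
import Mathlib
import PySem

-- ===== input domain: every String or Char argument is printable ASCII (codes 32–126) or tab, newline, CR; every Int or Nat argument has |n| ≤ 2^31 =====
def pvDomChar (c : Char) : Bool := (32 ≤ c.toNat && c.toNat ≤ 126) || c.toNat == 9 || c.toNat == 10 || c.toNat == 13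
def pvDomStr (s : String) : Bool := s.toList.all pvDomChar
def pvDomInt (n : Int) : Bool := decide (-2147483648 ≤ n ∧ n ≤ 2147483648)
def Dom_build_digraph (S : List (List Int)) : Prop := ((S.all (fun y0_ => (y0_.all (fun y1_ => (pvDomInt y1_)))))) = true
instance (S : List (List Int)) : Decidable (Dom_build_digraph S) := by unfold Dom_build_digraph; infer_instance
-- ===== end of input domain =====

-- B collects all implication edges into one flat edge list and then builds G and GT by
-- per-node gather passes, instead of A's interleaved in-place appends into both adjacency lists.

-- ===== PORT A =====
-- shared module helper has_intersection (identical in A and B)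
def hasInter (I1 I2 : List Int) : Bool :=
  if I1.getD 0 0 ≥ I2.getD 0 0 ∧ I1.getD 0 0 ≤ I2.getD 1 0 then true
  else if I1.getD 1 0 ≥ I2.getD 0 0 ∧ I1.getD 1 0 ≤ I2.getD 1 0 then true
  else if I2.getD 0 0 ≥ I1.getD 0 0 ∧ I2.getD 0 0 ≤ I1.getD 1 0 then true
  else if I2.getD 1 0 ≥ I1.getD 0 0 ∧ I2.getD 1 0 ≤ I1.getD 1 0 then true
  else false

-- G[n].append(x) on a list-of-lists (index always in range in both ports)
def appAt (L : List (List Int)) (n : Nat) (x : Int) : List (List Int) := L.modify n (· ++ [x])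

def build_digraph (S : List (List Int)) : List (List (List Int)) :=
  let size := S.length * 4
  let st0 : List (List Int) × List (List Int) := (List.replicate size [], List.replicate size [])
  let st1 := (List.range S.length).foldl (fun st c1 =>
      let i := c1*4
      (appAt (appAt st.1 (i+1) ((i+2 : Nat) : Int)) (i+3) ((i : Nat) : Int),
       appAt (appAt st.2 (i+2) ((i+1 : Nat) : Int)) i ((i+3 : Nat) : Int))) st0
  let st2 := (List.range S.length).foldl (fun st c1 =>
      (List.range 2).foldl (fun st c2 =>
        let i := c2*2
        let tr1 := [(S.getD c1 []).getD i 0, (S.getD c1 []).getD (i+1) 0]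
        (List.range' c1 (S.length - c1)).foldl (fun st c3 =>
          (List.range 2).foldl (fun st c4 =>
            if c1 = c3 ∧ c2 = c4 then st else
            let j := c4*2
            let tr2 := [(S.getD c3 []).getD j 0, (S.getD c3 []).getD (j+1) 0]
            if hasInter tr1 tr2 then
              let k := c1*4
              let l := c3*4
              let st' := (appAt st.1 (k+i) ((l+j+1 : Nat) : Int), appAt st.2 (l+j+1) ((k+i : Nat) : Int))
              if c1 ≠ c3 then
                (appAt st'.1 (l+j) ((k+i+1 : Nat) : Int), appAt st'.2 (k+i+1) ((l+j : Nat) : Int))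
              else st'
            else st) st) st) st) st1
  [st2.1, st2.2]

-- ===== PORT B =====
def build_digraph_alt (S : List (List Int)) : List (List (List Int)) :=
  let size := S.length * 4
  let E0 : List (Nat × Nat) := (List.range S.length).foldl (fun E c1 =>
      let i := c1*4
      E ++ [(i+1, i+2)] ++ [(i+3, i)]) []
  let E := (List.range S.length).foldl (fun E c1 =>
      (List.range 2).foldl (fun E c2 =>
        let i := c2*2
        let tr1 := [(S.getD c1 []).getD i 0, (S.getD c1 []).getD (i+1) 0]
        (List.range' c1 (S.length - c1)).foldl (fun E c3 =>
          (List.range 2).foldl (fun E c4 =>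
            if c1 = c3 ∧ c2 = c4 then E else
            let j := c4*2
            let tr2 := [(S.getD c3 []).getD j 0, (S.getD c3 []).getD (j+1) 0]
            if hasInter tr1 tr2 then
              let k := c1*4
              let l := c3*4
              if c1 ≠ c3 then E ++ [(k+i, l+j+1)] ++ [(l+j, k+i+1)]
              else E ++ [(k+i, l+j+1)]
            else E) E) E) E) E0
  let G := (List.range size).map (fun n => E.filterMap (fun p => if p.1 = n then some ((p.2 : Nat) : Int) else none))
  let GT := (List.range size).map (fun n => E.filterMap (fun p => if p.2 = n then some ((p.1 : Nat) : Int) else none))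
  [G, GT]

-- ===== PRECONDITION & SPEC =====
-- Pre_ excludes exactly the inputs where Python A raises IndexError: some row of S has
-- fewer than 4 elements (A reads S[c1][0..3]).
def Pre_build_digraph (S : List (List Int)) : Prop := ∀ row ∈ S, 4 ≤ row.length
instance (S : List (List Int)) : Decidable (Pre_build_digraph S) := by unfold Pre_build_digraph; infer_instance

def pvWitness_build_digraph : List (List Int) := [[0, 1, 2, 3], [2, 3, 0, 1]]

def Spec_build_digraph (S : List (List Int)) (out : List (List (List Int))) : Prop := out = build_digraph_alt S
instance (S : List (List Int)) (out : List (List (List Int))) : Decidable (Spec_build_digraph S out) := by unfold Spec_build_digraph; infer_instance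

-- ===== CLAIM (what is proved, stated in full; the proofs are below) =====
def Claim_equal_build_digraph : Prop := ∀ (S : List (List Int)), Dom_build_digraph S → Pre_build_digraph S → Spec_build_digraph S (build_digraph S)

-- ===== LEMMAS AND PROOFS =====

-- the list of edges A appends (in A's traversal order); each A-append to G is paired with
-- the reversed append to GT, so one edge list describes both.
def emit (S : List (List Int)) (c1 c2 c3 c4 : Nat) : List (Nat × Nat) :=
  if c1 = c3 ∧ c2 = c4 then [] else
  if hasInter [(S.getD c1 []).getD (c2*2) 0, (S.getD c1 []).getD (c2*2+1) 0]
              [(S.getD c3 []).getD (c4*2) 0, (S.getD c3 []).getD (c4*2+1) 0] then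
    if c1 ≠ c3 then [(c1*4+c2*2, c3*4+c4*2+1), (c3*4+c4*2, c1*4+c2*2+1)]
    else [(c1*4+c2*2, c3*4+c4*2+1)]
  else []

def edges (S : List (List Int)) : List (Nat × Nat) :=
  (List.range S.length).flatMap (fun c1 => [(c1*4+1, c1*4+2), (c1*4+3, c1*4)]) ++
  (List.range S.length).flatMap (fun c1 =>
    (List.range 2).flatMap (fun c2 =>
      (List.range' c1 (S.length - c1)).flatMap (fun c3 =>
        (List.range 2).flatMap (fun c4 => emit S c1 c2 c3 c4))))

def scat (E : List (Nat × Nat)) (L : List (List Int)) : List (List Int) :=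
  E.foldl (fun L p => appAt L p.1 ((p.2 : Nat) : Int)) L

def scatT (E : List (Nat × Nat)) (L : List (List Int)) : List (List Int) :=
  E.foldl (fun L p => appAt L p.2 ((p.1 : Nat) : Int)) L

lemma scat_append (E1 E2 : List (Nat × Nat)) (L : List (List Int)) :
    scat (E1 ++ E2) L = scat E2 (scat E1 L) := List.foldl_append

lemma scatT_append (E1 E2 : List (Nat × Nat)) (L : List (List Int)) :
    scatT (E1 ++ E2) L = scatT E2 (scatT E1 L) := List.foldl_append

lemma pairscat_flatMap {ι : Type} (I : List ι) (g : ι → List (Nat × Nat))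
    (st : List (List Int) × List (List Int)) :
    I.foldl (fun st t => (scat (g t) st.1, scatT (g t) st.2)) st
      = (scat (I.flatMap g) st.1, scatT (I.flatMap g) st.2) := by
  induction I generalizing st with
  | nil => simp [scat, scatT]
  | cons a I ih =>
      rw [List.flatMap_cons, scat_append, scatT_append, List.foldl_cons]
      exact ih _

lemma append_flatMap {ι : Type} (I : List ι) (g : ι → List (Nat × Nat)) (E0 : List (Nat × Nat)) :
    I.foldl (fun E t => E ++ g t) E0 = E0 ++ I.flatMap g := by
  induction I generalizing E0 with
  | nil => simp
  | cons a I ih => rw [List.foldl_cons, ih, List.flatMap_cons, List.append_assoc]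


lemma foldl_fun_congr {a b : Type} (l : List a) (f g : b → a → b) (init : b)
    (h : ∀ x y, f x y = g x y) : l.foldl f init = l.foldl g init := by
  have hfg : f = g := funext fun x => funext fun y => h x y
  rw [hfg]

def emit4 (S : List (List Int)) (c1 c2 c3 : Nat) : List (Nat × Nat) :=
  (List.range 2).flatMap (fun c4 => emit S c1 c2 c3 c4)

def emit3 (S : List (List Int)) (c1 c2 : Nat) : List (Nat × Nat) :=
  (List.range' c1 (S.length - c1)).flatMap (fun c3 => emit4 S c1 c2 c3)

def emit2 (S : List (List Int)) (c1 : Nat) : List (Nat × Nat) :=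
  (List.range 2).flatMap (fun c2 => emit3 S c1 c2)

lemma stepA_eq (S : List (List Int)) (c1 c2 c3 c4 : Nat) (st : List (List Int) × List (List Int)) :
    (if c1 = c3 ∧ c2 = c4 then st else
      if hasInter [(S.getD c1 []).getD (c2*2) 0, (S.getD c1 []).getD (c2*2+1) 0]
                  [(S.getD c3 []).getD (c4*2) 0, (S.getD c3 []).getD (c4*2+1) 0] then
        let st' := (appAt st.1 (c1*4+c2*2) ((c3*4+c4*2+1 : Nat) : Int),
                    appAt st.2 (c3*4+c4*2+1) ((c1*4+c2*2 : Nat) : Int))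
        if c1 ≠ c3 then
          (appAt st'.1 (c3*4+c4*2) ((c1*4+c2*2+1 : Nat) : Int),
           appAt st'.2 (c1*4+c2*2+1) ((c3*4+c4*2 : Nat) : Int))
        else st'
      else st)
    = (scat (emit S c1 c2 c3 c4) st.1, scatT (emit S c1 c2 c3 c4) st.2) := by
  unfold emit
  by_cases h1 : c1 = c3 ∧ c2 = c4
  · simp only [if_pos h1]; simp [scat, scatT]
  · simp only [if_neg h1]
    by_cases h2 : hasInter [(S.getD c1 []).getD (c2*2) 0, (S.getD c1 []).getD (c2*2+1) 0]
                  [(S.getD c3 []).getD (c4*2) 0, (S.getD c3 []).getD (c4*2+1) 0] = true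
    · simp only [if_pos h2]
      by_cases h3 : c1 ≠ c3
      · simp only [if_pos h3]; simp [scat, scatT]
      · simp only [if_neg h3]; simp [scat, scatT]
    · simp only [if_neg h2]; simp [scat, scatT]

lemma loop4A (S : List (List Int)) (c1 c2 c3 : Nat) (st : List (List Int) × List (List Int)) :
    (List.range 2).foldl (fun st c4 =>
      if c1 = c3 ∧ c2 = c4 then st else
      if hasInter [(S.getD c1 []).getD (c2*2) 0, (S.getD c1 []).getD (c2*2+1) 0]
                  [(S.getD c3 []).getD (c4*2) 0, (S.getD c3 []).getD (c4*2+1) 0] then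
        let st' := (appAt st.1 (c1*4+c2*2) ((c3*4+c4*2+1 : Nat) : Int),
                    appAt st.2 (c3*4+c4*2+1) ((c1*4+c2*2 : Nat) : Int))
        if c1 ≠ c3 then
          (appAt st'.1 (c3*4+c4*2) ((c1*4+c2*2+1 : Nat) : Int),
           appAt st'.2 (c1*4+c2*2+1) ((c3*4+c4*2 : Nat) : Int))
        else st'
      else st) st
    = (scat (emit4 S c1 c2 c3) st.1, scatT (emit4 S c1 c2 c3) st.2) := by
  rw [foldl_fun_congr _ _ (fun st c4 => (scat (emit S c1 c2 c3 c4) st.1, scatT (emit S c1 c2 c3 c4) st.2)) st (fun st c4 => stepA_eq S c1 c2 c3 c4 st), emit4, pairscat_flatMap]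

lemma loop3A (S : List (List Int)) (c1 c2 : Nat) (st : List (List Int) × List (List Int)) :
    (List.range' c1 (S.length - c1)).foldl (fun st c3 =>
      (List.range 2).foldl (fun st c4 =>
        if c1 = c3 ∧ c2 = c4 then st else
        if hasInter [(S.getD c1 []).getD (c2*2) 0, (S.getD c1 []).getD (c2*2+1) 0]
                    [(S.getD c3 []).getD (c4*2) 0, (S.getD c3 []).getD (c4*2+1) 0] then
          let st' := (appAt st.1 (c1*4+c2*2) ((c3*4+c4*2+1 : Nat) : Int),
                      appAt st.2 (c3*4+c4*2+1) ((c1*4+c2*2 : Nat) : Int))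
          if c1 ≠ c3 then
            (appAt st'.1 (c3*4+c4*2) ((c1*4+c2*2+1 : Nat) : Int),
             appAt st'.2 (c1*4+c2*2+1) ((c3*4+c4*2 : Nat) : Int))
          else st'
        else st) st) st
    = (scat (emit3 S c1 c2) st.1, scatT (emit3 S c1 c2) st.2) := by
  rw [foldl_fun_congr _ _ (fun st c3 => (scat (emit4 S c1 c2 c3) st.1, scatT (emit4 S c1 c2 c3) st.2)) st (fun st c3 => loop4A S c1 c2 c3 st), emit3, pairscat_flatMap]

lemma loop2A (S : List (List Int)) (c1 : Nat) (st : List (List Int) × List (List Int)) :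
    (List.range 2).foldl (fun st c2 =>
      (List.range' c1 (S.length - c1)).foldl (fun st c3 =>
        (List.range 2).foldl (fun st c4 =>
          if c1 = c3 ∧ c2 = c4 then st else
          if hasInter [(S.getD c1 []).getD (c2*2) 0, (S.getD c1 []).getD (c2*2+1) 0]
                      [(S.getD c3 []).getD (c4*2) 0, (S.getD c3 []).getD (c4*2+1) 0] then
            let st' := (appAt st.1 (c1*4+c2*2) ((c3*4+c4*2+1 : Nat) : Int),
                        appAt st.2 (c3*4+c4*2+1) ((c1*4+c2*2 : Nat) : Int))
            if c1 ≠ c3 then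
              (appAt st'.1 (c3*4+c4*2) ((c1*4+c2*2+1 : Nat) : Int),
               appAt st'.2 (c1*4+c2*2+1) ((c3*4+c4*2 : Nat) : Int))
            else st'
          else st) st) st) st
    = (scat (emit2 S c1) st.1, scatT (emit2 S c1) st.2) := by
  rw [foldl_fun_congr _ _ (fun st c2 => (scat (emit3 S c1 c2) st.1, scatT (emit3 S c1 c2) st.2)) st (fun st c2 => loop3A S c1 c2 st), emit2, pairscat_flatMap]

lemma loopTopA (S : List (List Int)) (st : List (List Int) × List (List Int)) :
    (List.range S.length).foldl (fun st c1 =>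
      (List.range 2).foldl (fun st c2 =>
        (List.range' c1 (S.length - c1)).foldl (fun st c3 =>
          (List.range 2).foldl (fun st c4 =>
            if c1 = c3 ∧ c2 = c4 then st else
            if hasInter [(S.getD c1 []).getD (c2*2) 0, (S.getD c1 []).getD (c2*2+1) 0]
                        [(S.getD c3 []).getD (c4*2) 0, (S.getD c3 []).getD (c4*2+1) 0] then
              let st' := (appAt st.1 (c1*4+c2*2) ((c3*4+c4*2+1 : Nat) : Int),
                          appAt st.2 (c3*4+c4*2+1) ((c1*4+c2*2 : Nat) : Int))
              if c1 ≠ c3 then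
                (appAt st'.1 (c3*4+c4*2) ((c1*4+c2*2+1 : Nat) : Int),
                 appAt st'.2 (c1*4+c2*2+1) ((c3*4+c4*2 : Nat) : Int))
              else st'
            else st) st) st) st) st
    = (scat ((List.range S.length).flatMap (fun c1 => emit2 S c1)) st.1,
       scatT ((List.range S.length).flatMap (fun c1 => emit2 S c1)) st.2) := by
  rw [foldl_fun_congr _ _ (fun st c1 => (scat (emit2 S c1) st.1, scatT (emit2 S c1) st.2)) st (fun st c1 => loop2A S c1 st), pairscat_flatMap]

lemma loop1A (S : List (List Int)) (st : List (List Int) × List (List Int)) :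
    (List.range S.length).foldl (fun st c1 =>
      (appAt (appAt st.1 (c1*4+1) ((c1*4+2 : Nat) : Int)) (c1*4+3) ((c1*4 : Nat) : Int),
       appAt (appAt st.2 (c1*4+2) ((c1*4+1 : Nat) : Int)) (c1*4) ((c1*4+3 : Nat) : Int))) st
    = (scat ((List.range S.length).flatMap (fun c1 => [(c1*4+1, c1*4+2), (c1*4+3, c1*4)])) st.1,
       scatT ((List.range S.length).flatMap (fun c1 => [(c1*4+1, c1*4+2), (c1*4+3, c1*4)])) st.2) := by
  rw [foldl_fun_congr _ _ (fun st c1 => (scat [(c1*4+1, c1*4+2), (c1*4+3, c1*4)] st.1, scatT [(c1*4+1, c1*4+2), (c1*4+3, c1*4)] st.2)) st ?_, pairscat_flatMap]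
  intro st c1
  simp [scat, scatT]

lemma A_eq_scat (S : List (List Int)) :
    build_digraph S = [scat (edges S) (List.replicate (S.length*4) []),
                       scatT (edges S) (List.replicate (S.length*4) [])] := by
  simp only [build_digraph]
  rw [loop1A, loopTopA]
  simp only [edges, emit2, emit3, emit4, scat_append, scatT_append]

lemma stepB_eq (S : List (List Int)) (c1 c2 c3 c4 : Nat) (E : List (Nat × Nat)) :
    (if c1 = c3 ∧ c2 = c4 then E else
      if hasInter [(S.getD c1 []).getD (c2*2) 0, (S.getD c1 []).getD (c2*2+1) 0]
                  [(S.getD c3 []).getD (c4*2) 0, (S.getD c3 []).getD (c4*2+1) 0] then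
        if c1 ≠ c3 then E ++ [(c1*4+c2*2, c3*4+c4*2+1)] ++ [(c3*4+c4*2, c1*4+c2*2+1)]
        else E ++ [(c1*4+c2*2, c3*4+c4*2+1)]
      else E)
    = E ++ emit S c1 c2 c3 c4 := by
  unfold emit
  by_cases h1 : c1 = c3 ∧ c2 = c4
  · simp only [if_pos h1]; simp
  · simp only [if_neg h1]
    by_cases h2 : hasInter [(S.getD c1 []).getD (c2*2) 0, (S.getD c1 []).getD (c2*2+1) 0]
                  [(S.getD c3 []).getD (c4*2) 0, (S.getD c3 []).getD (c4*2+1) 0] = true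
    · simp only [if_pos h2]
      by_cases h3 : c1 ≠ c3
      · simp only [if_pos h3, List.append_assoc, List.cons_append, List.nil_append]
      · simp only [if_neg h3]
    · simp only [if_neg h2]; simp

lemma loop4B (S : List (List Int)) (c1 c2 c3 : Nat) (E : List (Nat × Nat)) :
    (List.range 2).foldl (fun E c4 =>
      if c1 = c3 ∧ c2 = c4 then E else
      if hasInter [(S.getD c1 []).getD (c2*2) 0, (S.getD c1 []).getD (c2*2+1) 0]
                  [(S.getD c3 []).getD (c4*2) 0, (S.getD c3 []).getD (c4*2+1) 0] then
        if c1 ≠ c3 then E ++ [(c1*4+c2*2, c3*4+c4*2+1)] ++ [(c3*4+c4*2, c1*4+c2*2+1)]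
        else E ++ [(c1*4+c2*2, c3*4+c4*2+1)]
      else E) E
    = E ++ emit4 S c1 c2 c3 := by
  rw [foldl_fun_congr _ _ (fun E c4 => E ++ emit S c1 c2 c3 c4) E (fun E c4 => stepB_eq S c1 c2 c3 c4 E), emit4, append_flatMap]

lemma loop3B (S : List (List Int)) (c1 c2 : Nat) (E : List (Nat × Nat)) :
    (List.range' c1 (S.length - c1)).foldl (fun E c3 =>
      (List.range 2).foldl (fun E c4 =>
        if c1 = c3 ∧ c2 = c4 then E else
        if hasInter [(S.getD c1 []).getD (c2*2) 0, (S.getD c1 []).getD (c2*2+1) 0]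
                    [(S.getD c3 []).getD (c4*2) 0, (S.getD c3 []).getD (c4*2+1) 0] then
          if c1 ≠ c3 then E ++ [(c1*4+c2*2, c3*4+c4*2+1)] ++ [(c3*4+c4*2, c1*4+c2*2+1)]
          else E ++ [(c1*4+c2*2, c3*4+c4*2+1)]
        else E) E) E
    = E ++ emit3 S c1 c2 := by
  rw [foldl_fun_congr _ _ (fun E c3 => E ++ emit4 S c1 c2 c3) E (fun E c3 => loop4B S c1 c2 c3 E), emit3, append_flatMap]

lemma loop2B (S : List (List Int)) (c1 : Nat) (E : List (Nat × Nat)) :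
    (List.range 2).foldl (fun E c2 =>
      (List.range' c1 (S.length - c1)).foldl (fun E c3 =>
        (List.range 2).foldl (fun E c4 =>
          if c1 = c3 ∧ c2 = c4 then E else
          if hasInter [(S.getD c1 []).getD (c2*2) 0, (S.getD c1 []).getD (c2*2+1) 0]
                      [(S.getD c3 []).getD (c4*2) 0, (S.getD c3 []).getD (c4*2+1) 0] then
            if c1 ≠ c3 then E ++ [(c1*4+c2*2, c3*4+c4*2+1)] ++ [(c3*4+c4*2, c1*4+c2*2+1)]
            else E ++ [(c1*4+c2*2, c3*4+c4*2+1)]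
          else E) E) E) E
    = E ++ emit2 S c1 := by
  rw [foldl_fun_congr _ _ (fun E c2 => E ++ emit3 S c1 c2) E (fun E c2 => loop3B S c1 c2 E), emit2, append_flatMap]

lemma loopTopB (S : List (List Int)) (E : List (Nat × Nat)) :
    (List.range S.length).foldl (fun E c1 =>
      (List.range 2).foldl (fun E c2 =>
        (List.range' c1 (S.length - c1)).foldl (fun E c3 =>
          (List.range 2).foldl (fun E c4 =>
            if c1 = c3 ∧ c2 = c4 then E else
            if hasInter [(S.getD c1 []).getD (c2*2) 0, (S.getD c1 []).getD (c2*2+1) 0]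
                        [(S.getD c3 []).getD (c4*2) 0, (S.getD c3 []).getD (c4*2+1) 0] then
              if c1 ≠ c3 then E ++ [(c1*4+c2*2, c3*4+c4*2+1)] ++ [(c3*4+c4*2, c1*4+c2*2+1)]
              else E ++ [(c1*4+c2*2, c3*4+c4*2+1)]
            else E) E) E) E) E
    = E ++ (List.range S.length).flatMap (fun c1 => emit2 S c1) := by
  rw [foldl_fun_congr _ _ (fun E c1 => E ++ emit2 S c1) E (fun E c1 => loop2B S c1 E), append_flatMap]

lemma loop1B (S : List (List Int)) :
    (List.range S.length).foldl (fun E c1 => E ++ [(c1*4+1, c1*4+2)] ++ [(c1*4+3, c1*4)]) ([] : List (Nat × Nat))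
    = (List.range S.length).flatMap (fun c1 => [(c1*4+1, c1*4+2), (c1*4+3, c1*4)]) := by
  rw [foldl_fun_congr _ _ (fun E c1 => E ++ [(c1*4+1, c1*4+2), (c1*4+3, c1*4)]) [] (fun E c1 => by simp), append_flatMap]
  simp

lemma B_eq_gather (S : List (List Int)) :
    build_digraph_alt S =
      [(List.range (S.length*4)).map (fun n => (edges S).filterMap (fun p => if p.1 = n then some ((p.2 : Nat) : Int) else none)),
       (List.range (S.length*4)).map (fun n => (edges S).filterMap (fun p => if p.2 = n then some ((p.1 : Nat) : Int) else none))] := by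
  simp only [build_digraph_alt]
  rw [loop1B, loopTopB]
  simp only [edges, emit2, emit3, emit4]

lemma scat_length (E : List (Nat × Nat)) (L : List (List Int)) : (scat E L).length = L.length := by
  induction E generalizing L with
  | nil => rfl
  | cons p E ih => simp [scat, List.foldl_cons] at ih ⊢; rw [ih, appAt, List.length_modify]

lemma scat_getElem (E : List (Nat × Nat)) (L : List (List Int)) (n : Nat) (h : n < (scat E L).length) :
    (scat E L)[n] = L[n]'(by rwa [scat_length] at h) ++ E.filterMap (fun p => if p.1 = n then some ((p.2 : Nat) : Int) else none) := by
  induction E generalizing L with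
  | nil => simp [scat]
  | cons p E ih =>
      have h' : n < (scat E (appAt L p.1 ((p.2 : Nat) : Int))).length := by
        rw [scat_length, appAt, List.length_modify]
        rw [scat_length] at h; simpa using h
      have := ih (appAt L p.1 ((p.2 : Nat) : Int)) h'
      simp only [scat, List.foldl_cons] at this ⊢
      rw [this]
      have hn : n < L.length := by rw [scat_length] at h; simpa using h
      by_cases hc : p.1 = n
      · simp [appAt, hc]
      · simp [appAt, hc]

lemma scatT_eq_scat_swap (E : List (Nat × Nat)) (L : List (List Int)) :
    scatT E L = scat (E.map Prod.swap) L := by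
  simp [scat, scatT, List.foldl_map, Prod.swap]

lemma scat_replicate (E : List (Nat × Nat)) (size : Nat) :
    scat E (List.replicate size []) =
      (List.range size).map (fun n => E.filterMap (fun p => if p.1 = n then some ((p.2 : Nat) : Int) else none)) := by
  apply List.ext_getElem
  · simp [scat_length]
  · intro n h1 h2
    rw [scat_getElem]
    simp

lemma scatT_replicate (E : List (Nat × Nat)) (size : Nat) :
    scatT E (List.replicate size []) =
      (List.range size).map (fun n => E.filterMap (fun p => if p.2 = n then some ((p.1 : Nat) : Int) else none)) := by
  rw [scatT_eq_scat_swap, scat_replicate]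
  simp [List.filterMap_map, Function.comp, Prod.swap]

-- ===== VERDICT (by name: the statement is the Claim_ definition above) =====
theorem build_digraph_spec : Claim_equal_build_digraph := by
  intro S _ _
  unfold Spec_build_digraph
  rw [A_eq_scat, B_eq_gather, scat_replicate, scatT_replicate]
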